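-- pv_equiv track=rewrite | github.com/pypi-data/pypi-mirror-314 | packages/TextVault/textvault-1.0.1-py3-none-any.whl/TextVault/rsa.py | base36_encode
-- ===== SOURCE A (Python) =====
-- def base36_encode(num):
--     chars = "0123456789ABCDEFGHIJKLMNOPQRSTUVWXYZ"
--     if num == 0:
--         return "0"
--     result = []
--     while num:
--         num, rem = divmod(num, 36)
--         result.append(chars[rem])
--     return ''.join(reversed(result))
-- ===== SOURCE B (Python) =====
-- def base36_encode(num):
--     chars = "0123456789ABCDEFGHIJKLMNOPQRSTUVWXYZ"
--     if num < 36: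
--         return chars[num]
--     return base36_encode(num // 36) + chars[num % 36]
-- ===== Notes on version B (the rewrite author's own statement) =====
-- stated objective: simpler
-- what changed: Replaces the digit-list loop (append least-significant digits, then reverse and join) with a direct recursive radix conversion that emits most-significant digits first, eliminating the list, the reversal and the special-case for 0.
-- outside the precondition, e.g. on base36_encode(-1): A does not finish within the time limit, B returns 'Z'
import Mathlib
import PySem

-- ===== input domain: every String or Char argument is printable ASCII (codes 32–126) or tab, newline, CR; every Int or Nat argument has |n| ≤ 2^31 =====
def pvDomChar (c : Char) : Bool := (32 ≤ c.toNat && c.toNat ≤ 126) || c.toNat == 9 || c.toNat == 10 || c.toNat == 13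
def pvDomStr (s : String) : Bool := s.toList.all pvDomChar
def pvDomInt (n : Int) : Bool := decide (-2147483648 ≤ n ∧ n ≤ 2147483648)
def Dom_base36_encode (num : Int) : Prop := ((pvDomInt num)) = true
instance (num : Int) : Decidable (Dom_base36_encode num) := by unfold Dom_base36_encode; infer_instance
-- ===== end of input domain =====

-- B replaces A's append-LSB-digits-then-reverse loop with a direct recursion that emits
-- most-significant digits first (objective: simpler).

-- ===== PORT A =====
-- the digit table "0123456789ABCDEFGHIJKLMNOPQRSTUVWXYZ", shared by both ports
def pvChars : String := "0123456789ABCDEFGHIJKLMNOPQRSTUVWXYZ"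

-- chars[r]; the default ' ' is unreachable on the indices either program uses under Pre_
def pvDigit (r : Int) : Char := (PySem.Str.pyGet? pvChars r).getD ' '

-- the `while num:` loop; `fuel` only makes the recursion total (num shrinks by //36 each
-- step, so `num.toNat + 1` fuel is never exhausted for num > 0)
def pvALoop (fuel : Nat) (num : Int) (result : List Char) : List Char :=
  match fuel with
  | 0 => result
  | f + 1 =>
    if num = 0 then result
    else pvALoop f (PySem.Int.floordiv num 36)
           (result ++ [pvDigit (PySem.Int.mod num 36)])

def base36_encode (num : Int) : String :=
  if num = 0 then "0"
  else String.ofList (pvALoop (num.toNat + 1) num []).reverse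

-- ===== PORT B =====
def base36_encode_alt (num : Int) : String :=
  if num < 36 then String.ofList [pvDigit num]
  else base36_encode_alt (PySem.Int.floordiv num 36) ++
         String.ofList [pvDigit (PySem.Int.mod num 36)]
termination_by num.toNat
decreasing_by
  have h2 : PySem.Int.floordiv num 36 < num :=
    (PySem.Int.floordiv_lt_iff_lt_mul (by omega)).mpr (by nlinarith)
  omega

-- ===== PRECONDITION & SPEC =====
-- Pre_ excludes negative inputs: there A's `while num:` never terminates
-- (divmod(-1, 36) = (-1, 35), so num stays -1 forever) and A returns nothing.
def Pre_base36_encode (num : Int) : Prop := 0 ≤ num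
instance (num : Int) : Decidable (Pre_base36_encode num) := by unfold Pre_base36_encode; infer_instance
def pvWitness_base36_encode : Int := (37)

def Spec_base36_encode (num : Int) (out : String) : Prop := out = base36_encode_alt num
instance (num : Int) (out : String) : Decidable (Spec_base36_encode num out) := by unfold Spec_base36_encode; infer_instance

-- ===== CLAIM (what is proved, stated in full; the proofs are below) =====
def Claim_equal_base36_encode : Prop := ∀ (num : Int), Dom_base36_encode num → Pre_base36_encode num → Spec_base36_encode num (base36_encode num)

-- ===== LEMMAS AND PROOFS =====

theorem pvAlt_rec (num : Int) (h : ¬ num < 36) :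
    base36_encode_alt num = base36_encode_alt (PySem.Int.floordiv num 36) ++
      String.ofList [pvDigit (PySem.Int.mod num 36)] := by
  rw [base36_encode_alt]; exact if_neg h

theorem pvALoop_zero (f : Nat) (res : List Char) : pvALoop f 0 res = res := by
  cases f <;> simp [pvALoop]

-- the loop appends exactly the reverse of B's digit string
theorem pvALoop_eq (n : Nat) : ∀ (num : Int), num.toNat = n → 0 < num →
    ∀ (res : List Char) (fuel : Nat), num.toNat ≤ fuel →
      pvALoop fuel num res = res ++ (base36_encode_alt num).toList.reverse := by
  induction n using Nat.strong_induction_on with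
  | _ n ih =>
    intro num hn hpos res fuel hfuel
    have h1 : 1 ≤ num.toNat := by omega
    obtain ⟨f, rfl⟩ : ∃ f, fuel = f + 1 := ⟨fuel - 1, by omega⟩
    rw [pvALoop, if_neg (by omega)]
    have hfd : PySem.Int.floordiv num 36 = num / 36 :=
      PySem.Int.floordiv_eq_ediv_of_pos (by omega)
    have hmd : PySem.Int.mod num 36 = num % 36 :=
      PySem.Int.mod_eq_emod_of_pos (by omega)
    by_cases h : num < 36
    · have hd0 : num / 36 = 0 := Int.ediv_eq_zero_of_lt (by omega) (by omega)
      have hm : num % 36 = num := Int.emod_eq_of_lt (by omega) (by omega)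
      rw [hfd, hd0, pvALoop_zero, base36_encode_alt, if_pos h]
      simp [hm]
    · have hq : num / 36 < num := by
        have := (PySem.Int.floordiv_lt_iff_lt_mul (a := num) (b := 36) (q := num) (by omega)).mpr (by nlinarith)
        omega
      have hqpos : 0 < num / 36 := by
        have := (PySem.Int.le_floordiv_iff_mul_le (a := num) (b := 36) (q := 1) (by omega)).mpr (by omega)
        omega
      rw [hfd]
      rw [ih (num / 36).toNat (by omega) (num / 36) rfl hqpos _ f (by omega)]
      conv_rhs => rw [pvAlt_rec num h]
      rw [hfd]
      simp [String.toList_append, String.toList_ofList]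

theorem base36_encode_spec : Claim_equal_base36_encode := by
  intro num _ hpre
  have hp : (0 : Int) ≤ num := hpre
  unfold Spec_base36_encode base36_encode
  by_cases h0 : num = 0
  · subst h0
    rw [if_pos rfl, base36_encode_alt, if_pos (by omega)]
    decide
  · rw [if_neg h0,
        pvALoop_eq num.toNat num rfl (by omega) [] (num.toNat + 1) (by omega)]
    simp
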